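-- pv_equiv track=rewrite | github.com/ren-jamie11/book_app | static.py | process_blurb
-- ===== SOURCE A (Python) =====
-- def process_blurb(blurb: str, max_length: int = 400) -> str:
--     if len(blurb) <= max_length:
--         return blurb
--
--     # Truncate the blurb
--     snippet = blurb[:max_length]
--
--     # Find the last occurrence of preferred punctuation
--     cut_index = max(snippet.rfind(p) for p in [".", ",", "-", ";"])
--
--     # If no punctuation found, just hard cut
--     if cut_index == -1:
--         return snippet.rstrip() + "..."
--
--     return snippet[:cut_index].rstrip() + "..."
-- ===== SOURCE B (Python) =====
-- def process_blurb(blurb: str, max_length: int = 400) -> str: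
--     if len(blurb) <= max_length:
--         return blurb
--
--     snippet = blurb[:max_length]
--
--     # Normalize the four punctuation marks to one sentinel character, then
--     # split once at the last sentinel; the head's length is the cut position.
--     unified = "".join("." if ch in ".,-;" else ch for ch in snippet)
--     head, sep, _ = unified.rpartition(".")
--
--     if not sep:
--         return snippet.rstrip() + "..."
--
--     return snippet[:len(head)].rstrip() + "..."
-- ===== Notes on version B (the rewrite author's own statement) =====
-- stated objective: alternative
-- what changed: B first normalizes the four punctuation marks to a single sentinel character with one character map and then splits once with rpartition, cutting the snippet at the head's length, instead of combining four rfind scans with max.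
import Mathlib
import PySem

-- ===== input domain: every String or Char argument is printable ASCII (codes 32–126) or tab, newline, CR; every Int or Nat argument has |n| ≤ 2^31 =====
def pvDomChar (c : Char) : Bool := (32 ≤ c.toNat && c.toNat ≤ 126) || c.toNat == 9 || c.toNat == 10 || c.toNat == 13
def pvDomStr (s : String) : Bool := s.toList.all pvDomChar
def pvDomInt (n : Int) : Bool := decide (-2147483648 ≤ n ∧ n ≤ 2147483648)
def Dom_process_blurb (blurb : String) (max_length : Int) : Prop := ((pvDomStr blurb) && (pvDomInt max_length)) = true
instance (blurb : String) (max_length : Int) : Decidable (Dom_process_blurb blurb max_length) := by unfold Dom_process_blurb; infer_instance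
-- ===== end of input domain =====

-- B normalizes the four punctuation marks to one sentinel via a character map and then
-- splits once with rpartition, cutting at the head's length, instead of A's four rfind
-- scans combined with max (objective: alternative).

-- ===== PORT A =====
def process_blurb (blurb : String) (max_length : Int) : String :=
  if PySem.Str.len blurb ≤ max_length then blurb
  else
    let snippet := PySem.Str.slice blurb none (some max_length)
    -- max(snippet.rfind(p) for p in [".", ",", "-", ";"]) : left fold of binary max
    let cut_index := max (max (max (PySem.Str.rfind snippet ".") (PySem.Str.rfind snippet ","))
        (PySem.Str.rfind snippet "-")) (PySem.Str.rfind snippet ";")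
    if cut_index = -1 then PySem.Str.rstrip snippet ++ "..."
    else PySem.Str.rstrip (PySem.Str.slice snippet none (some cut_index)) ++ "..."

-- ===== PORT B =====
-- '"." if ch in ".,-;" else ch'
def pbNorm (c : Char) : Char := if c = '.' || c = ',' || c = '-' || c = ';' then '.' else c

-- str.rpartition(sep) for a one-character sep, ported by hand: returns the part
-- BEFORE the last occurrence of sep, or none when sep does not occur
def pbRpartitionHead : List Char → Char → Option (List Char)
  | [], _ => none
  | c :: rest, sep =>
    match pbRpartitionHead rest sep with
    | some h => some (c :: h)
    | none => if c = sep then some [] else none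

def process_blurb_alt (blurb : String) (max_length : Int) : String :=
  if PySem.Str.len blurb ≤ max_length then blurb
  else
    let snippet := PySem.Str.slice blurb none (some max_length)
    let unified := String.ofList (snippet.toList.map pbNorm)
    match pbRpartitionHead unified.toList '.' with
    | none => PySem.Str.rstrip snippet ++ "..."
    | some head =>
        PySem.Str.rstrip (PySem.Str.slice snippet none (some (head.length : Int))) ++ "..."

-- ===== PRECONDITION & SPEC =====
def Spec_process_blurb (blurb : String) (max_length : Int) (out : String) : Prop := out = process_blurb_alt blurb max_length
instance (blurb : String) (max_length : Int) (out : String) : Decidable (Spec_process_blurb blurb max_length out) := by unfold Spec_process_blurb; infer_instance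

-- ===== CLAIM (what is proved, stated in full; the proofs are below) =====
def Claim_equal_process_blurb : Prop := ∀ (blurb : String) (max_length : Int), Dom_process_blurb blurb max_length → Spec_process_blurb blurb max_length (process_blurb blurb max_length)

-- ===== LEMMAS AND PROOFS =====

-- equation lemmas for PySem.Chars.rfind.go
theorem pb_go_zero (s sub : List Char) :
    PySem.Chars.rfind.go s sub 0 = if sub.isPrefixOf s then 0 else -1 := by
  simp only [PySem.Chars.rfind.go]

theorem pb_go_succ (s sub : List Char) (j : Nat) :
    PySem.Chars.rfind.go s sub (j + 1)
      = if sub.isPrefixOf (s.drop (j + 1)) then ((j + 1 : Nat) : Int)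
        else PySem.Chars.rfind.go s sub j := by
  simp only [PySem.Chars.rfind.go]

-- [d].isPrefixOf l just tests the head of l
theorem pb_isPrefixOf_singleton (d : Char) (l : List Char) :
    [d].isPrefixOf l = match l with | [] => false | x :: _ => d == x := by
  cases l <;> simp [List.isPrefixOf]

theorem pb_go_le (s sub : List Char) (k : Nat) :
    PySem.Chars.rfind.go s sub k ≤ (k : Int) := by
  induction k with
  | zero => rw [pb_go_zero]; split <;> omega
  | succ j ih =>
    rw [pb_go_succ]
    split
    · omega
    · exact le_trans ih (by push_cast; omega)

theorem pb_go_append (t : List Char) (c d : Char) (j : Nat) (hj : j < t.length) :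
    PySem.Chars.rfind.go (t ++ [c]) [d] j = PySem.Chars.rfind.go t [d] j := by
  induction j with
  | zero =>
    rw [pb_go_zero, pb_go_zero]
    simp only [pb_isPrefixOf_singleton]
    cases t with
    | nil => simp at hj
    | cons x xs => simp
  | succ j ih =>
    rw [pb_go_succ, pb_go_succ]
    simp only [pb_isPrefixOf_singleton]
    have hd : (t ++ [c]).drop (j + 1) = t.drop (j + 1) ++ [c] := by
      rw [List.drop_append_of_le_length (by omega)]
    rw [hd]
    cases hcase : t.drop (j + 1) with
    | nil =>
      have := List.drop_eq_nil_iff.mp hcase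
      omega
    | cons x xs =>
      simp only [List.cons_append]
      split
      · rfl
      · exact ih (by omega)

-- rfind of a single character over t ++ [c]
theorem pb_rfind_append (t : List Char) (c d : Char) :
    PySem.Chars.rfind (t ++ [c]) [d] =
      if c = d then (t.length : Int) else PySem.Chars.rfind t [d] := by
  unfold PySem.Chars.rfind
  have hlen : (t ++ [c]).length = t.length + 1 := by simp
  rw [hlen, pb_go_succ]
  have h1 : (t ++ [c]).drop (t.length + 1) = [] := by
    apply List.drop_eq_nil_iff.mpr; simp
  rw [h1]
  simp only [pb_isPrefixOf_singleton, Bool.false_eq_true, if_false]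
  cases t with
  | nil =>
    simp only [List.length_nil, List.nil_append, pb_go_zero, pb_isPrefixOf_singleton]
    by_cases h : c = d
    · subst h; simp
    · simp [h, Ne.symm h]
  | cons x xs =>
    simp only [List.length_cons]
    rw [pb_go_succ]
    have hd : ((x :: xs) ++ [c]).drop (xs.length + 1) = [c] := by
      rw [List.drop_append_of_le_length (by simp)]
      simp
    rw [hd]
    simp only [pb_isPrefixOf_singleton]
    by_cases h : c = d
    · subst h; simp
    · simp only [show (d == c) = false from by simp [Ne.symm h], Bool.false_eq_true, if_false,
        if_neg h]
      rw [pb_go_append (x :: xs) c d xs.length (by simp), pb_go_succ]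
      have : (x :: xs).drop (xs.length + 1) = [] := by
        apply List.drop_eq_nil_iff.mpr; simp
      rw [this]
      simp

theorem pb_rfind_lt (t : List Char) (d : Char) :
    PySem.Chars.rfind t [d] < (t.length : Int) := by
  unfold PySem.Chars.rfind
  cases t with
  | nil => simp [pb_go_zero]
  | cons x xs =>
    simp only [List.length_cons]
    rw [pb_go_succ]
    have h0 : (x :: xs).drop (xs.length + 1) = [] := by
      apply List.drop_eq_nil_iff.mpr; simp
    rw [h0]
    simp only [pb_isPrefixOf_singleton, Bool.false_eq_true, if_false]
    have := pb_go_le (x :: xs) [d] xs.length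
    push_cast
    omega

-- rpartitionHead over a snoc
theorem pb_rpartition_append (t : List Char) (c sep : Char) :
    pbRpartitionHead (t ++ [c]) sep =
      if c = sep then some t else pbRpartitionHead t sep := by
  induction t with
  | nil => simp [pbRpartitionHead]
  | cons x xs ih =>
    simp only [List.cons_append, pbRpartitionHead, ih]
    by_cases h : c = sep
    · simp [h]
    · simp only [if_neg h]

-- the length-of-head view of B's cut equals A's max of four rfinds
def pbCut (l : List Char) : Int :=
  match pbRpartitionHead (l.map pbNorm) '.' with
  | none => -1
  | some h => (h.length : Int)

theorem pb_cut_eq_max (s : List Char) :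
    pbCut s =
      max (max (max (PySem.Chars.rfind s ['.']) (PySem.Chars.rfind s [',']))
        (PySem.Chars.rfind s ['-'])) (PySem.Chars.rfind s [';']) := by
  induction s using List.reverseRecOn with
  | nil => simp [pbCut, pbRpartitionHead, PySem.Chars.rfind, pb_go_zero]
  | append_singleton t c ih =>
    have hmap : (t ++ [c]).map pbNorm = t.map pbNorm ++ [pbNorm c] := by simp
    rw [pb_rfind_append, pb_rfind_append, pb_rfind_append, pb_rfind_append]
    have h1 := pb_rfind_lt t '.'
    have h2 := pb_rfind_lt t ','
    have h3 := pb_rfind_lt t '-'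
    have h4 := pb_rfind_lt t ';'
    by_cases hp : (c = '.' || c = ',' || c = '-' || c = ';') = true
    · have hnc : pbNorm c = '.' := by simp only [pbNorm, hp, if_true]
      have hL : pbCut (t ++ [c]) = (t.length : Int) := by
        simp [pbCut, hmap, hnc, pb_rpartition_append]
      rw [hL]
      simp only [Bool.or_eq_true, decide_eq_true_eq] at hp
      rcases hp with ((h | h) | h) | h <;> subst h <;>
        simp only [if_true,
          if_neg (by decide : ¬('.' : Char) = ','), if_neg (by decide : ¬('.' : Char) = '-'),
          if_neg (by decide : ¬('.' : Char) = ';'), if_neg (by decide : ¬(',' : Char) = '.'),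
          if_neg (by decide : ¬(',' : Char) = '-'), if_neg (by decide : ¬(',' : Char) = ';'),
          if_neg (by decide : ¬('-' : Char) = '.'), if_neg (by decide : ¬('-' : Char) = ','),
          if_neg (by decide : ¬('-' : Char) = ';'), if_neg (by decide : ¬(';' : Char) = '.'),
          if_neg (by decide : ¬(';' : Char) = ','), if_neg (by decide : ¬(';' : Char) = '-')] <;>
        omega
    · have hnc : pbNorm c = c := by simp [pbNorm, hp]
      simp only [Bool.or_eq_true, decide_eq_true_eq, not_or] at hp
      have hcdot : ¬ (c = '.') := hp.1.1.1
      have hL : pbCut (t ++ [c]) = pbCut t := by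
        simp [pbCut, hmap, hnc, pb_rpartition_append, hcdot]
      rw [hL, if_neg hp.1.1.1, if_neg hp.1.1.2, if_neg hp.1.2, if_neg hp.2]
      exact ih

-- String-level version of pb_cut_eq_max
theorem pb_cut_str (s : String) :
    pbCut s.toList =
      max (max (max (PySem.Str.rfind s ".") (PySem.Str.rfind s ","))
        (PySem.Str.rfind s "-")) (PySem.Str.rfind s ";") := by
  have h := pb_cut_eq_max s.toList
  simpa [PySem.Str.rfind] using h

-- ===== VERDICT (by name: the statement is the Claim_ definition above) =====
theorem process_blurb_spec : Claim_equal_process_blurb := by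
  intro blurb max_length _
  unfold Spec_process_blurb
  show process_blurb blurb max_length = process_blurb_alt blurb max_length
  unfold process_blurb process_blurb_alt
  by_cases hlen : PySem.Str.len blurb ≤ max_length
  · rw [if_pos hlen, if_pos hlen]
  · simp only [hlen, if_false]
    set snippet := PySem.Str.slice blurb none (some max_length) with hs
    have htl : (String.ofList (snippet.toList.map pbNorm)).toList = snippet.toList.map pbNorm := by
      simp
    rw [htl, ← pb_cut_str snippet]
    cases hr : pbRpartitionHead (snippet.toList.map pbNorm) '.' with
    | none => simp [pbCut, hr]
    | some h =>
        have hne : ¬ ((h.length : Int) = -1) := by omega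
        simp [pbCut, hr, hne]
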